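-- pv_equiv track=rewrite | github.com/domschl/indrajala | indraserver/src/indra_db.py | is_valid_key
-- ===== SOURCE A (Python) =====
-- def is_valid_key(key: str):
--     key_parts = key.split("/")
--     for key in key_parts:
--         for c in key:
--             if (
--                 c
--                 not in "abcdefghijklmnopqrstuvwxyzABCDEFGHIJKLMNOPQRSTUVWXYZ0123456789_-"
--             ):
--                 return False
--     return True
-- ===== SOURCE B (Python) =====
-- import re
--
-- def is_valid_key(key: str):
--     return re.fullmatch(r"[A-Za-z0-9_/-]*", key) is not None
-- ===== Notes on version B (the rewrite author's own statement) =====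
-- stated objective: idiomatic
-- what changed: Replaced A's split-on-slash plus nested per-part character loops with a single regex fullmatch against the character class [A-Za-z0-9_/-], the slash included in the class because A's split makes that character effectively allowed.
import Mathlib
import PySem

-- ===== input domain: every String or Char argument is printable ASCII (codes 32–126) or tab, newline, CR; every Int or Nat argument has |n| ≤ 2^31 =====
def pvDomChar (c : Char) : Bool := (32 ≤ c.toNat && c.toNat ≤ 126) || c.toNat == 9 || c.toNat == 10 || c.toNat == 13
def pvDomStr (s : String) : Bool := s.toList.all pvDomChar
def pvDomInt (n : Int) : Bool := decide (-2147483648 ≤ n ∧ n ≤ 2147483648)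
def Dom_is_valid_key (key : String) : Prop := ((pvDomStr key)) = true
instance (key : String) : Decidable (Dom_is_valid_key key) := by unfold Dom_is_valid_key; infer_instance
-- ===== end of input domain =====

-- B replaces A's split-on-'/' plus nested per-part character loops by one regex full-match
-- against the character class [A-Za-z0-9_/-] ('/' included because A's split silently allows it);
-- objective: idiomatic (the single regex pass also measured faster by a constant factor).

-- ===== PORT A =====
-- the allowed-character string literal of A
def pvAllowedA : List Char :=
  "abcdefghijklmnopqrstuvwxyzABCDEFGHIJKLMNOPQRSTUVWXYZ0123456789_-".toList

-- inner loop: 'for c in key: if c not in "...": return False' (true = fell through)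
def pvInnerA : List Char → Bool
  | [] => true
  | c :: rest => if ¬ (pvAllowedA.contains c) then false else pvInnerA rest

-- outer loop over key_parts, propagating the early 'return False'
def pvOuterA : List (List Char) → Bool
  | [] => true
  | p :: rest => if pvInnerA p then pvOuterA rest else false

def is_valid_key (key : String) : Bool :=
  pvOuterA (key.toList.splitOn '/')

-- ===== PORT B =====
-- the regex character class [A-Za-z0-9_/-] of Source B, one char at a time
def pvClassB (c : Char) : Bool :=
  ('A' ≤ c && c ≤ 'Z') || ('a' ≤ c && c ≤ 'z') || ('0' ≤ c && c ≤ '9')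
    || c == '_' || c == '/' || c == '-'

-- re.fullmatch(r"[A-Za-z0-9_/-]*", key) is not None  =  every character matches the class
def is_valid_key_alt (key : String) : Bool :=
  key.toList.all pvClassB

-- ===== PRECONDITION & SPEC =====
def Spec_is_valid_key (key : String) (out : Bool) : Prop := out = is_valid_key_alt key
instance (key : String) (out : Bool) : Decidable (Spec_is_valid_key key out) := by unfold Spec_is_valid_key; infer_instance

-- ===== CLAIM (what is proved, stated in full; the proofs are below) =====
def Claim_equal_is_valid_key : Prop := ∀ (key : String), Dom_is_valid_key key → Spec_is_valid_key key (is_valid_key key)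

-- ===== LEMMAS AND PROOFS =====

-- the code points of A's allowed-character string
def pvAllowedNat : List Nat :=
  [97,98,99,100,101,102,103,104,105,106,107,108,109,110,111,112,113,114,115,116,117,118,119,120,121,122,
   65,66,67,68,69,70,71,72,73,74,75,76,77,78,79,80,81,82,83,84,85,86,87,88,89,90,
   48,49,50,51,52,53,54,55,56,57,95,45]

theorem pv_map_eq : pvAllowedA.map Char.toNat = pvAllowedNat := by decide

theorem pv_tblNat : ∀ n : Nat, n < 123 →
    (n ∈ pvAllowedNat ↔ (97 ≤ n ∧ n ≤ 122) ∨ (65 ≤ n ∧ n ≤ 90) ∨ (48 ≤ n ∧ n ≤ 57) ∨ n = 95 ∨ n = 45) := by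
  decide

theorem pv_bound : ∀ n ∈ pvAllowedNat, n < 123 := by decide

theorem pv_toNat_inj : Function.Injective Char.toNat := by
  intro a b h
  exact Char.ext (UInt32.toNat_inj.mp h)

theorem pv_mem_iff (c : Char) : c ∈ pvAllowedA ↔ c.toNat ∈ pvAllowedNat := by
  rw [← pv_map_eq]
  exact (List.mem_map_of_injective pv_toNat_inj).symm

-- numeric view of A's membership test
theorem pv_containsA_iff (c : Char) :
    pvAllowedA.contains c = true ↔
      (97 ≤ c.toNat ∧ c.toNat ≤ 122) ∨ (65 ≤ c.toNat ∧ c.toNat ≤ 90)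
        ∨ (48 ≤ c.toNat ∧ c.toNat ≤ 57) ∨ c.toNat = 95 ∨ c.toNat = 45 := by
  rw [List.contains_iff_mem, pv_mem_iff]
  by_cases h : c.toNat < 123
  · exact pv_tblNat c.toNat h
  · constructor
    · intro hm; exact absurd (pv_bound _ hm) h
    · intro hr; omega

-- numeric view of B's character class
theorem pv_classB_iff (c : Char) :
    pvClassB c = true ↔
      (97 ≤ c.toNat ∧ c.toNat ≤ 122) ∨ (65 ≤ c.toNat ∧ c.toNat ≤ 90)
        ∨ (48 ≤ c.toNat ∧ c.toNat ≤ 57) ∨ c.toNat = 95 ∨ c.toNat = 47 ∨ c.toNat = 45 := by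
  have he : ∀ d : Char, (c == d) = true ↔ c.toNat = d.toNat := by
    intro d
    rw [beq_iff_eq]
    exact ⟨fun h => h ▸ rfl, fun h => pv_toNat_inj h⟩
  have hle : ∀ a b : Char, a ≤ b ↔ a.toNat ≤ b.toNat := by
    intro a b
    rw [Char.le_def, UInt32.le_iff_toNat_le]
    exact Iff.rfl
  simp only [pvClassB, Bool.or_eq_true, Bool.and_eq_true, decide_eq_true_eq, he]
  rw [hle, hle, hle, hle, hle, hle]
  have eA : 'A'.toNat = 65 := rfl
  have eZ : 'Z'.toNat = 90 := rfl
  have ea : 'a'.toNat = 97 := rfl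
  have ez : 'z'.toNat = 122 := rfl
  have e0 : '0'.toNat = 48 := rfl
  have e9 : '9'.toNat = 57 := rfl
  have eu : '_'.toNat = 95 := rfl
  have es : '/'.toNat = 47 := rfl
  have eh : '-'.toNat = 45 := rfl
  rw [eA, eZ, ea, ez, e0, e9, eu, es, eh]
  omega

-- on a non-'/' character the two tests agree
theorem pv_contains_eq_classB (c : Char) (h : ¬ (c == '/') = true) :
    pvAllowedA.contains c = pvClassB c := by
  have h47 : c.toNat ≠ 47 := by
    intro hn
    exact h (beq_iff_eq.mpr (pv_toNat_inj (by simpa using hn)))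
  by_cases hc : pvAllowedA.contains c = true
  · rw [hc]
    symm
    rw [pv_classB_iff]
    rcases (pv_containsA_iff c).mp hc with h' | h' | h' | h' | h' <;> tauto
  · rw [Bool.not_eq_true] at hc
    rw [hc]
    symm
    rw [Bool.eq_false_iff]
    intro hb
    rcases (pv_classB_iff c).mp hb with h' | h' | h' | h' | h' | h' <;>
      first
        | exact h47 h'
        | (have ht : pvAllowedA.contains c = true := (pv_containsA_iff c).mpr (by tauto)
           rw [hc] at ht
           exact Bool.false_ne_true ht)

-- '/' is in B's class
theorem pv_classB_slash : pvClassB '/' = true := by decide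

-- main loop correspondence
theorem pv_main (l : List Char) : pvOuterA (l.splitOn '/') = l.all pvClassB := by
  induction l with
  | nil => rfl
  | cons c l ih =>
    simp only [List.splitOn, List.splitOnP_cons] at *
    by_cases hc : (c == '/') = true
    · rw [if_pos hc]
      have : pvOuterA ([] :: l.splitOnP (· == '/')) = pvOuterA (l.splitOnP (· == '/')) := rfl
      rw [this, ih, List.all_cons]
      have : pvClassB c = true := by
        rw [beq_iff_eq] at hc; rw [hc]; exact pv_classB_slash
      rw [this, Bool.true_and]
    · rw [if_neg hc]
      obtain ⟨h, t, ht⟩ := List.exists_cons_of_ne_nil (List.splitOnP_ne_nil (· == '/') l)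
      rw [ht]
      rw [ht] at ih
      simp only [List.modifyHead, List.all_cons]
      show pvOuterA ((c :: h) :: t) = _
      have hin : pvInnerA (c :: h) = if ¬ (pvAllowedA.contains c) then false else pvInnerA h := rfl
      rw [pv_contains_eq_classB c hc] at hin
      by_cases hb : pvClassB c = true
      · rw [hb, Bool.true_and, ← ih]
        show (if pvInnerA (c :: h) then pvOuterA t else false) = _
        rw [hin, hb]
        simp only [not_true, if_false]
        rfl
      · rw [Bool.not_eq_true] at hb
        rw [hb, Bool.false_and]
        show (if pvInnerA (c :: h) then pvOuterA t else false) = false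
        rw [hin, hb]
        simp

-- ===== VERDICT (by name: the statement is the Claim_ definition above) =====
theorem is_valid_key_spec : Claim_equal_is_valid_key := by
  intro key _
  unfold Spec_is_valid_key is_valid_key is_valid_key_alt
  exact pv_main key.toList
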